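-- pv_equiv track=rewrite | github.com/BBN-E/nlplingo | nlplingo/common/utils.py | split_offsets
-- ===== SOURCE A (Python) =====
-- def split_offsets(line, _len=len):
--     """
--     Retain character offsets from line, splitting the string line.
--     :param line: any string
--     :param _len: length function
--     :return:
--     """
--     words = line.split()
--     index = line.index
--     offsets = []
--     append = offsets.append
--     running_offset = 0
--     for word in words:
--         word_offset = index(word, running_offset)
--         word_len = _len(word)
--         running_offset = word_offset + word_len
--         append((word, word_offset, running_offset - 1))
--     return offsets
-- ===== SOURCE B (Python) =====
-- def split_offsets(line, _len=len):
--     """Single pass over the characters: skip whitespace, scan each token,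
--     record (token, start, end_inclusive). No split()/index() calls."""
--     offsets = []
--     i = 0
--     n = _len(line)
--     while i < n:
--         if line[i].isspace():
--             i += 1
--         else:
--             start = i
--             while i < n and not line[i].isspace():
--                 i += 1
--             offsets.append((line[start:i], start, i - 1))
--     return offsets
-- ===== Notes on version B (the rewrite author's own statement) =====
-- stated objective: alternative
-- what changed: B replaces split()-then-index() re-searching with a single character scan that tracks token start/end positions directly, never searching for a word it has already seen.
import Mathlib
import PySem

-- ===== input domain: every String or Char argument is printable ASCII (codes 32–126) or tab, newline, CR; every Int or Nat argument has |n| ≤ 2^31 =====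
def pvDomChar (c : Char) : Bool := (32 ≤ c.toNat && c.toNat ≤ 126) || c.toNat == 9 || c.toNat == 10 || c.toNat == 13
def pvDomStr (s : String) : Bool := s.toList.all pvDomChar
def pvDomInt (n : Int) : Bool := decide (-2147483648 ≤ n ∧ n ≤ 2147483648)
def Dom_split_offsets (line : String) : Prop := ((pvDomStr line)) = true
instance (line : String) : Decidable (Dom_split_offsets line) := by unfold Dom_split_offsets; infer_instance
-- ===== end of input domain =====

-- B replaces A's split()-then-index() searching with one direct character scan; same output, alternative algorithm.

-- ===== PORT A =====
-- A: words = line.split(); for each word, word_offset = line.index(word, running_offset);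
-- append (word, word_offset, word_offset + len(word) - 1). line.index never fails on the states
-- this loop reaches, so the port uses findFrom's value directly; A is total.
def split_offsets (line : String) : List (String × Int × Int) :=
  ((PySem.Str.split₀ line).foldl
    (fun (st : Int × List (String × Int × Int)) word =>
      let word_offset := PySem.Str.findFrom line word st.1
      let word_len : Int := PySem.Str.len word
      let running_offset := word_offset + word_len
      (running_offset, st.2 ++ [(word, word_offset, running_offset - 1)]))
    ((0 : Int), [])).2

-- ===== PORT B =====
-- B: single scan over the characters, tracking the index i; skip whitespace, take the maximal
-- non-whitespace run as the token ('while i < n and not line[i].isspace(): i += 1' = takeWhile),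
-- and append (token, start, end_inclusive).
def pvNotSpace (c : Char) : Bool := !PySem.Chars.isspace c

def splitAltGo : List Char → Nat → List (String × Int × Int) → List (String × Int × Int)
  | [], _, acc => acc
  | c :: rest, i, acc =>
    if PySem.Chars.isspace c then splitAltGo rest (i + 1) acc
    else
      let w := (c :: rest).takeWhile pvNotSpace
      splitAltGo ((c :: rest).dropWhile pvNotSpace) (i + w.length)
        (acc ++ [(String.ofList w, (i : Int), (i : Int) + (w.length : Int) - 1)])
  termination_by cs _ _ => cs.length
  decreasing_by
    all_goals first
      | (rename_i hc
         rw [List.dropWhile_cons_of_pos (by simp [pvNotSpace, hc])]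
         exact Nat.lt_succ_of_le (List.length_dropWhile_le _ _))
      | simp

def split_offsets_alt (line : String) : List (String × Int × Int) :=
  splitAltGo line.toList 0 []

-- ===== PRECONDITION & SPEC =====
def Spec_split_offsets (line : String) (out : List (String × Int × Int)) : Prop := out = split_offsets_alt line
instance (line : String) (out : List (String × Int × Int)) : Decidable (Spec_split_offsets line out) := by unfold Spec_split_offsets; infer_instance

-- ===== CLAIM (what is proved, stated in full; the proofs are below) =====
def Claim_equal_split_offsets : Prop := ∀ (line : String), Dom_split_offsets line → Spec_split_offsets line (split_offsets line)

-- ===== LEMMAS AND PROOFS =====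

-- A's fold body, lowered to List Char (proof-only helper).
def stepAC (line : List Char) (st : Int × List (String × Int × Int)) (w : List Char) :
    Int × List (String × Int × Int) :=
  let off := PySem.Chars.findFrom line w st.1
  (off + w.length, st.2 ++ [(String.ofList w, off, off + (w.length : Int) - 1)])

lemma portA_chars (line : String) :
    split_offsets line = ((PySem.Chars.split₀ line.toList).foldl (stepAC line.toList) (0, [])).2 := by
  simp [split_offsets, PySem.Str.split₀, List.foldl_map, PySem.Str.findFrom_eq,
    PySem.Str.len_eq, String.toList_ofList]
  rfl

-- one step of split₀.go on a non-space head
lemma go_step {c : Char} (rest cur : List Char) (acc : List (List Char))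
    (hc : ¬ PySem.Chars.isspace c = true) :
    PySem.Chars.split₀.go (c :: rest) cur acc = PySem.Chars.split₀.go rest (c :: cur) acc := by
  simp only [PySem.Chars.split₀.go]
  simp [hc]

-- split₀.go with a nonempty done-accumulator: the accumulator is reversed onto the front.
lemma go_acc (s : List Char) : ∀ (cur : List Char) (acc : List (List Char)),
    PySem.Chars.split₀.go s cur acc = acc.reverse ++ PySem.Chars.split₀.go s cur [] := by
  induction s with
  | nil =>
    intro cur acc
    simp only [PySem.Chars.split₀.go]
    split_ifs <;> simp
  | cons c rest ih =>
    intro cur acc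
    by_cases h1 : PySem.Chars.isspace c
    · by_cases h2 : cur.isEmpty
      · simp only [PySem.Chars.split₀.go, h1, h2]
        simp only [if_true]
        exact ih [] acc
      · simp only [PySem.Chars.split₀.go, h1, h2]
        simp only [if_true, Bool.false_eq_true, if_false]
        rw [ih [] (cur.reverse :: acc), ih [] [cur.reverse]]
        simp
    · rw [go_step rest cur acc h1, go_step rest cur [] h1]
      exact ih (c :: cur) acc

-- split₀.go eats the maximal non-space run into cur.
lemma go_skip (s : List Char) : ∀ (cur : List Char) (acc : List (List Char)),
    PySem.Chars.split₀.go s cur acc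
      = PySem.Chars.split₀.go (s.dropWhile pvNotSpace) ((s.takeWhile pvNotSpace).reverse ++ cur) acc := by
  induction s with
  | nil => intro cur acc; simp
  | cons c rest ih =>
    intro cur acc
    by_cases hc : PySem.Chars.isspace c
    · rw [List.dropWhile_cons_of_neg (by simp [pvNotSpace, hc]),
          List.takeWhile_cons_of_neg (by simp [pvNotSpace, hc])]
      simp
    · rw [List.dropWhile_cons_of_pos (by simp [pvNotSpace, hc]),
          List.takeWhile_cons_of_pos (by simp [pvNotSpace, hc])]
      rw [go_step rest cur acc hc, ih (c :: cur) acc]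
      simp

lemma split0_space {c : Char} (s : List Char) (hc : PySem.Chars.isspace c = true) :
    PySem.Chars.split₀ (c :: s) = PySem.Chars.split₀ s := by
  simp only [PySem.Chars.split₀, PySem.Chars.split₀.go, hc]
  simp

lemma split0_word {c : Char} (s : List Char) (hc : PySem.Chars.isspace c = false) :
    PySem.Chars.split₀ (c :: s)
      = ((c :: s).takeWhile pvNotSpace) :: PySem.Chars.split₀ ((c :: s).dropWhile pvNotSpace) := by
  have htw : (c :: s).takeWhile pvNotSpace = c :: s.takeWhile pvNotSpace :=
    List.takeWhile_cons_of_pos (by simp [pvNotSpace, hc])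
  have hdw : (c :: s).dropWhile pvNotSpace = s.dropWhile pvNotSpace :=
    List.dropWhile_cons_of_pos (by simp [pvNotSpace, hc])
  rw [htw, hdw]
  show PySem.Chars.split₀.go (c :: s) [] [] = _
  rw [go_skip (c :: s) [] []]
  rw [List.dropWhile_cons_of_pos (by simp [pvNotSpace, hc]), htw]
  cases hdm : s.dropWhile pvNotSpace with
  | nil =>
    simp only [PySem.Chars.split₀.go]
    simp [PySem.Chars.split₀, PySem.Chars.split₀.go]
  | cons d0 d' =>
    have hne : s.dropWhile pvNotSpace ≠ [] := by simp [hdm]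
    have hd0f : pvNotSpace ((s.dropWhile pvNotSpace).head hne) = false :=
      List.head_dropWhile_not pvNotSpace hne
    have hd0 : PySem.Chars.isspace d0 = true := by
      have h : (s.dropWhile pvNotSpace).head hne = d0 := by simp [hdm]
      rw [h] at hd0f
      simpa [pvNotSpace] using hd0f
    simp only [PySem.Chars.split₀.go, hd0]
    simp only [if_true]
    have h : ((c :: s.takeWhile pvNotSpace).reverse ++ []).isEmpty = false := by simp
    rw [h]
    simp only [Bool.false_eq_true, if_false]
    rw [go_acc d' [] _, split0_space d' hd0]
    simp [PySem.Chars.split₀]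

-- the first occurrence of a token, searched from inside the preceding whitespace, is the token start
lemma findFrom_at (p q s w' : List Char) (c : Char)
    (hq : ∀ x ∈ q, PySem.Chars.isspace x = true) (hc : PySem.Chars.isspace c = false)
    (hpre : (c :: w') <+: s) :
    PySem.Chars.findFrom (p ++ q ++ s) (c :: w') (p.length : Int) = ((p.length + q.length : Nat) : Int) := by
  set line := p ++ q ++ s with hline
  have hklen : p.length ≤ line.length := by simp [hline]
  have hdropP : line.drop p.length = q ++ s := by
    simp [hline, List.append_assoc]
  have hdropS : line.drop (p.length + q.length) = s := by
    have h : line = (p ++ q) ++ s := by simp [hline]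
    rw [h, List.drop_append, List.drop_eq_nil_of_le (by simp), List.nil_append,
        List.length_append, Nat.sub_self, List.drop_zero]
  have hne : PySem.Chars.findFrom line (c :: w') (p.length : Int) ≠ -1 := by
    rw [Ne, PySem.Chars.findFrom_natCast_eq_neg_one_iff line (c :: w') p.length hklen, hdropP]
    exact not_not_intro ((hpre.isInfix).trans (List.suffix_append q s).isInfix)
  obtain ⟨h1, h2, h3⟩ := PySem.Chars.findFrom_natCast_spec line (c :: w') p.length hklen hne
  set r := PySem.Chars.findFrom line (c :: w') (p.length : Int) with hr
  have hocc : (c :: w') <+: line.drop (p.length + q.length) := by rw [hdropS]; exact hpre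
  have hub : r.toNat ≤ p.length + q.length := by
    by_contra hlt
    exact h3 (p.length + q.length) (by omega) (by omega) hocc
  have hpr : p.length ≤ r.toNat := by omega
  have hlb : ¬ r.toNat < p.length + q.length := by
    intro hlt
    have hj : r.toNat - p.length < q.length := by omega
    have hdropR : line.drop r.toNat = q.drop (r.toNat - p.length) ++ s := by
      have hl2 : line = p ++ (q ++ s) := by simp [hline]
      have hz : r.toNat - p.length - q.length = 0 := by omega
      rw [hl2, List.drop_append, List.drop_eq_nil_of_le (by omega), List.nil_append,
          List.drop_append, hz, List.drop_zero]
    rw [hdropR, List.drop_eq_getElem_cons hj, List.cons_append] at h2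
    have hceq : c = q[r.toNat - p.length] := (List.cons_prefix_cons.mp h2).1
    have hmem : c ∈ q := by rw [hceq]; exact List.getElem_mem hj
    have := hq c hmem
    simp [this] at hc
  have : r.toNat = p.length + q.length := by omega
  omega

-- loop invariant: A's fold over the words of the remaining suffix s, searching from the end of the
-- processed prefix p (with only whitespace q between p and s), produces B's scan of s at index |p|+|q|.
lemma key : ∀ (N : Nat) (s : List Char), s.length ≤ N →
    ∀ (p q : List Char) (acc : List (String × Int × Int)),
    (∀ x ∈ q, PySem.Chars.isspace x = true) →
    ((PySem.Chars.split₀ s).foldl (stepAC (p ++ q ++ s)) (((p.length : Nat) : Int), acc)).2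
      = splitAltGo s (p.length + q.length) acc := by
  intro N
  induction N with
  | zero =>
    intro s hs p q acc hq
    have : s = [] := List.eq_nil_of_length_eq_zero (by omega)
    subst this
    simp [PySem.Chars.split₀, PySem.Chars.split₀.go, splitAltGo]
  | succ n ih =>
    intro s hs p q acc hq
    match s with
    | [] => simp [PySem.Chars.split₀, PySem.Chars.split₀.go, splitAltGo]
    | c :: rest =>
      by_cases hc : PySem.Chars.isspace c
      · rw [split0_space rest hc]
        have hline : p ++ q ++ (c :: rest) = p ++ (q ++ [c]) ++ rest := by simp
        rw [hline]
        have hq' : ∀ x ∈ q ++ [c], PySem.Chars.isspace x = true := by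
          intro x hx
          rcases List.mem_append.mp hx with h | h
          · exact hq x h
          · simp at h; subst h; exact hc
        rw [ih rest (by simpa using Nat.lt_succ_iff.mp (by simpa using hs)) p (q ++ [c]) acc hq']
        rw [splitAltGo]
        simp [hc]
        ring_nf
      · have hcf : PySem.Chars.isspace c = false := by simpa using hc
        rw [split0_word rest hcf]
        set w := (c :: rest).takeWhile pvNotSpace with hw
        set r := (c :: rest).dropWhile pvNotSpace with hrr
        have hwc : w = c :: rest.takeWhile pvNotSpace := by
          rw [hw]; exact List.takeWhile_cons_of_pos (by simp [pvNotSpace, hcf])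
        have hsplit : w ++ r = c :: rest := by rw [hw, hrr]; exact List.takeWhile_append_dropWhile
        rw [List.foldl_cons]
        have hfind : PySem.Chars.findFrom (p ++ q ++ (c :: rest)) w ((p.length : Nat) : Int)
            = ((p.length + q.length : Nat) : Int) := by
          rw [hwc]
          exact findFrom_at p q (c :: rest) (rest.takeWhile pvNotSpace) c hq hcf
            (by rw [← hwc, ← hsplit]; exact List.prefix_append w r)
        have hstep : stepAC (p ++ q ++ (c :: rest)) (((p.length : Nat) : Int), acc) w
            = (((p.length + q.length + w.length : Nat) : Int),
               acc ++ [(String.ofList w, ((p.length + q.length : Nat) : Int),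
                        ((p.length + q.length : Nat) : Int) + (w.length : Int) - 1)]) := by
          simp only [stepAC, hfind]
          exact Prod.ext (by push_cast; ring) rfl
        rw [hstep]
        have hline2 : p ++ q ++ (c :: rest) = (p ++ q ++ w) ++ [] ++ r := by
          simp [← hsplit, List.append_assoc]
        rw [hline2]
        have hlen : ((p.length + q.length + w.length : Nat) : Int) = (((p ++ q ++ w).length : Nat) : Int) := by
          push_cast [List.length_append]; ring
        rw [hlen]
        have hrlen : r.length ≤ n := by
          have h1 : w.length + r.length = rest.length + 1 := by
            have := congrArg List.length hsplit; simpa using this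
          have hwpos : 0 < w.length := by rw [hwc]; simp
          have := hs; simp at this; omega
        rw [ih r hrlen (p ++ q ++ w) [] _ (by simp)]
        conv_rhs => rw [splitAltGo]
        simp only [hcf, Bool.false_eq_true, if_false, ← hw, ← hrr]
        congr 1
        simp [List.length_append]
        try omega

-- ===== VERDICT (by name: the statement is the Claim_ definition above) =====
theorem split_offsets_spec : Claim_equal_split_offsets := by
  intro line _
  show split_offsets line = split_offsets_alt line
  rw [portA_chars, split_offsets_alt]
  have h := key line.toList.length line.toList le_rfl [] [] [] (by simp)
  simpa using h
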